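-- pv_equiv track=rewrite | github.com/yarkoslav/skyscrapers | puzzle.py | second_property
-- ===== SOURCE A (Python) =====
-- def second_property(board: list) -> bool:
--     """
--     This function checks second property of board(are the same digits in column)
--
--     >>> second_property(["**** ****","***1 ****","**  3****","* 4 1****","     9 5 ",\
-- " 6  83  *","3   1  **","  8  2***","  2  ****"])
--     False
--     """
--     res = True
--     for i in range(8):
--         same_column = set()
--         for j in range(8):
--             square = board[j][i]
--             if square.isdigit() and square in same_column:
--                 res = False
--             else:
--                 same_column.add(square)
--     return res
-- ===== SOURCE B (Python) =====
-- def second_property(board: list) -> bool: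
--     for i in range(8):
--         for j in range(8):
--             square = board[j][i]
--             if square.isdigit():
--                 for k in range(j + 1, 8):
--                     if board[k][i] == square:
--                         return False
--     return True
-- ===== Notes on version B (the rewrite author's own statement) =====
-- stated objective: alternative
-- what changed: Duplicate digits in a column are detected by brute-force pairwise comparison (for each digit cell, scan the cells below it in the same column for an equal character, returning False immediately), with no set or auxiliary container at all, instead of A's incrementally grown set of seen characters with a sticky boolean flag.
import Mathlib
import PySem

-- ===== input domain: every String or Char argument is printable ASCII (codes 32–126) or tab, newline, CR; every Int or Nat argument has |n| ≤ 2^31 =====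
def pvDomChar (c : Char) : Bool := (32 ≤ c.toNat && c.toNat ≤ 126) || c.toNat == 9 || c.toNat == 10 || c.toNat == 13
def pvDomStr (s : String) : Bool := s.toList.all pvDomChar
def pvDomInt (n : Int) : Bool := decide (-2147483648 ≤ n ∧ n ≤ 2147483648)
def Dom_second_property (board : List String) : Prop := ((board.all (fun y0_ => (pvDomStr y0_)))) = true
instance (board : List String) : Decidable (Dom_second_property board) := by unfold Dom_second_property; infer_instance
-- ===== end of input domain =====

-- B detects a repeated column digit by brute-force pairwise comparison (each digit cell is
-- compared against the cells below it, returning False at once), using no set or flag at all,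
-- instead of A's incrementally grown set of seen characters with a sticky boolean (objective: alternative).

-- board[j][i] as both Pythons read it (total form; Pre_ guarantees the indexing succeeds)
def pvSquare (board : List String) (j i : Int) : Char :=
  (PySem.Str.pyGet? (PySem.List.pyGetD board j "") i).getD ' '

-- ===== PORT A =====
-- the body of A's inner loop: flag a digit already seen, otherwise add the character
def pvStepA (st : Bool × PySem.Set Char) (square : Char) : Bool × PySem.Set Char :=
  if PySem.Chars.isdigit square && PySem.Set.contains st.2 square
  then (false, st.2)
  else (st.1, PySem.Set.add st.2 square)

def second_property (board : List String) : Bool :=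
  (PySem.List.pyRange 0 8 1).foldl (fun res i =>
    ((PySem.List.pyRange 0 8 1).foldl
        (fun st j => pvStepA st (pvSquare board j i))
        (res, PySem.Set.empty)).1) true

-- ===== PORT B =====
-- innermost loop 'for k in range(j+1, 8): if board[k][i] == square: return False'
def pvLoopK (board : List String) (i : Int) (square : Char) : List Int → Bool
  | [] => true
  | k :: ks =>
    if pvSquare board k i == square then false
    else pvLoopK board i square ks

-- middle loop 'for j in range(8): …' (false propagates the early return)
def pvLoopJ (board : List String) (i : Int) : List Int → Bool
  | [] => true
  | j :: js =>
    let square := pvSquare board j i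
    if PySem.Chars.isdigit square then
      if pvLoopK board i square (PySem.List.pyRange (j + 1) 8 1)
      then pvLoopJ board i js
      else false
    else pvLoopJ board i js

-- outer loop 'for i in range(8): …'
def pvLoopI (board : List String) : List Int → Bool
  | [] => true
  | i :: is =>
    if pvLoopJ board i (PySem.List.pyRange 0 8 1) then pvLoopI board is else false

def second_property_alt (board : List String) : Bool :=
  pvLoopI board (PySem.List.pyRange 0 8 1)

-- ===== PRECONDITION & SPEC =====
-- Pre_: exactly the boards on which the Python A returns (A indexes board[j][i] for j,i < 8,
-- so it raises IndexError unless there are ≥ 8 rows whose first 8 each have ≥ 8 characters).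
def Pre_second_property (board : List String) : Prop :=
  8 ≤ board.length ∧ ∀ s ∈ board.take 8, 8 ≤ s.toList.length
instance (board : List String) : Decidable (Pre_second_property board) := by
  unfold Pre_second_property; infer_instance

def pvWitness_second_property : List String :=
  ["12345678", "2345678.", "3456789*", "4567891 ", "5678912x", "6789123y", "78912345", "89123456"]

def Spec_second_property (board : List String) (out : Bool) : Prop := out = second_property_alt board
instance (board : List String) (out : Bool) : Decidable (Spec_second_property board out) := by
  unfold Spec_second_property; infer_instance

-- ===== CLAIM (what is proved, stated in full; the proofs are below) =====
def Claim_equal_second_property : Prop := ∀ (board : List String), Dom_second_property board → Pre_second_property board → Spec_second_property board (second_property board)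

-- ===== LEMMAS AND PROOFS =====

-- A's inner loop, recursively on the column's characters
def pvOkA (s : PySem.Set Char) : List Char → Bool
  | [] => true
  | c :: cs =>
    if PySem.Chars.isdigit c && PySem.Set.contains s c then false
    else pvOkA (PySem.Set.add s c) cs

lemma pvFoldA_fst (cs : List Char) : ∀ (res : Bool) (s : PySem.Set Char),
    (cs.foldl pvStepA (res, s)).1 = (res && pvOkA s cs) := by
  induction cs with
  | nil => intro res s; simp [pvOkA]
  | cons c cs ih =>
    intro res s
    rw [List.foldl_cons]
    by_cases h : (PySem.Chars.isdigit c && PySem.Set.contains s c) = true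
    · have hstep : pvStepA (res, s) c = (false, s) := by
        simp only [pvStepA]; rw [if_pos h]
      rw [hstep, ih, pvOkA, if_pos h]
      simp
    · have hstep : pvStepA (res, s) c = (res, PySem.Set.add s c) := by
        simp only [pvStepA]; rw [if_neg h]
      rw [hstep, ih, pvOkA, if_neg h]

lemma pvOkA_true_iff (cs : List Char) : ∀ (s : PySem.Set Char),
    pvOkA s cs = true ↔
      ((cs.filter (fun c => PySem.Chars.isdigit c)).Nodup ∧
        ∀ c ∈ cs.filter (fun c => PySem.Chars.isdigit c), c ∉ s) := by
  induction cs with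
  | nil => intro s; simp [pvOkA]
  | cons c cs ih =>
    intro s
    by_cases hd : PySem.Chars.isdigit c = true
    · by_cases hs : c ∈ s
      · have h0 : pvOkA s (c :: cs) = false := by
          simp [pvOkA, hd, PySem.Set.contains, hs]
        simp only [h0, List.filter_cons, hd, if_pos]
        constructor
        · intro h; cases h
        · rintro ⟨-, h2⟩
          exact absurd hs (h2 c (by simp))
      · have h0 : pvOkA s (c :: cs) = pvOkA (PySem.Set.add s c) cs := by
          simp [pvOkA, hd, PySem.Set.contains, hs]
        rw [h0, ih (PySem.Set.add s c)]
        simp only [List.filter_cons, hd, if_pos, List.nodup_cons, List.mem_cons]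
        constructor
        · rintro ⟨h1, h2⟩
          refine ⟨⟨fun hc => ?_, h1⟩, fun d hd' => ?_⟩
          · exact h2 c hc ((PySem.Set.mem_add s c c).mpr (Or.inr rfl))
          · rcases hd' with rfl | hdm
            · exact hs
            · exact fun hds => h2 d hdm ((PySem.Set.mem_add s c d).mpr (Or.inl hds))
        · rintro ⟨⟨hcn, h1⟩, h2⟩
          refine ⟨h1, fun d hdm hda => ?_⟩
          rcases (PySem.Set.mem_add s c d).mp hda with h | rfl
          · exact h2 d (Or.inr hdm) h
          · exact hcn hdm
    · have h0 : pvOkA s (c :: cs) = pvOkA (PySem.Set.add s c) cs := by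
        simp [pvOkA, hd]
      rw [h0, ih (PySem.Set.add s c)]
      have hfil : (c :: cs).filter (fun c => PySem.Chars.isdigit c)
          = cs.filter (fun c => PySem.Chars.isdigit c) := by
        simp only [List.filter_cons]; rw [if_neg hd]
      rw [hfil]
      refine and_congr_right fun _ => forall₂_congr fun d hdm => ?_
      have hdd : PySem.Chars.isdigit d = true := by
        have := List.of_mem_filter hdm; simpa using this
      have hne : d ≠ c := fun h => hd (h ▸ hdd)
      constructor
      · intro h hds
        exact h ((PySem.Set.mem_add s c d).mpr (Or.inl hds))
      · intro h hda
        rcases (PySem.Set.mem_add s c d).mp hda with h' | rfl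
        · exact h h'
        · exact hne rfl

-- the pairwise check per column, on the column's character list
def pvPairFree : List Char → Bool
  | [] => true
  | c :: cs =>
    if PySem.Chars.isdigit c then (!(decide (c ∈ cs))) && pvPairFree cs
    else pvPairFree cs

lemma pvPairFree_true_iff (cs : List Char) :
    pvPairFree cs = true ↔ (cs.filter (fun c => PySem.Chars.isdigit c)).Nodup := by
  induction cs with
  | nil => simp [pvPairFree]
  | cons c cs ih =>
    by_cases hd : PySem.Chars.isdigit c = true
    · have hmem : c ∈ cs.filter (fun c => PySem.Chars.isdigit c) ↔ c ∈ cs := by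
        simp [List.mem_filter, hd]
      simp [pvPairFree, hd, ih, hmem]
    · simp [pvPairFree, hd, ih]

lemma pvPairFree_eq_pvOkA (cs : List Char) :
    pvPairFree cs = pvOkA PySem.Set.empty cs := by
  rw [Bool.eq_iff_iff, pvPairFree_true_iff, pvOkA_true_iff]
  constructor
  · intro hn; exact ⟨hn, by intro c _ hc; cases hc⟩
  · exact And.left

-- B's innermost loop finds exactly a membership in the scanned cells
lemma pvLoopK_eq (board : List String) (i : Int) (a : Char) (ks : List Int) :
    pvLoopK board i a ks = !(decide (a ∈ ks.map (fun k => pvSquare board k i))) := by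
  induction ks with
  | nil => simp [pvLoopK]
  | cons k ks ih =>
    by_cases h : pvSquare board k i = a
    · simp [pvLoopK, h]
    · simp [pvLoopK, h, ih, Ne.symm h]

-- B's middle loop over range(j0, 8) is the pairwise check of the column tail
lemma pvLoopJ_eq (board : List String) (i : Int) : ∀ (n : Nat) (j0 : Int), j0 + n = 8 →
    pvLoopJ board i (PySem.List.pyRange j0 8 1)
      = pvPairFree ((PySem.List.pyRange j0 8 1).map (fun j => pvSquare board j i)) := by
  intro n
  induction n with
  | zero =>
    intro j0 h
    have h8 : j0 = 8 := by omega
    subst h8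
    rw [PySem.List.pyRange_one_eq_nil (by omega)]
    simp [pvLoopJ, pvPairFree]
  | succ n ih =>
    intro j0 h
    have hlt : j0 < 8 := by omega
    rw [PySem.List.pyRange_one_cons hlt]
    have ihj := ih (j0 + 1) (by omega)
    simp only [pvLoopJ, List.map_cons, pvPairFree, pvLoopK_eq, ihj]
    by_cases hd : PySem.Chars.isdigit (pvSquare board j0 i) = true
    · rw [if_pos hd, if_pos hd]
      by_cases hm : pvSquare board j0 i ∈
          (PySem.List.pyRange (j0 + 1) 8 1).map (fun j => pvSquare board j i)
      · simp [hm]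
      · simp [hm]
    · rw [if_neg hd, if_neg hd]

-- B's outer loop is an 'all' over the columns
lemma pvLoopI_eq (board : List String) (l : List Int) :
    pvLoopI board l = l.all (fun i => pvLoopJ board i (PySem.List.pyRange 0 8 1)) := by
  induction l with
  | nil => simp [pvLoopI]
  | cons i is ih =>
    by_cases h : pvLoopJ board i (PySem.List.pyRange 0 8 1) = true
    · simp [pvLoopI, h, ih]
    · simp only [Bool.not_eq_true] at h
      simp [pvLoopI, h]

lemma pvFoldl_and_all (l : List Int) (f : Int → Bool) : ∀ (b : Bool),
    l.foldl (fun r x => r && f x) b = (b && l.all f) := by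
  induction l with
  | nil => intro b; simp
  | cons x l ih =>
    intro b
    simp [List.foldl_cons, ih, Bool.and_assoc]

-- ===== VERDICT (by name: the statement is the Claim_ definition above) =====
theorem second_property_spec : Claim_equal_second_property := by
  intro board _ _
  show second_property board = second_property_alt board
  unfold second_property second_property_alt
  have hfun : (fun (res : Bool) (i : Int) =>
        ((PySem.List.pyRange 0 8 1).foldl (fun st j => pvStepA st (pvSquare board j i))
          (res, PySem.Set.empty)).1)
      = fun (res : Bool) (i : Int) =>
        res && pvOkA PySem.Set.empty ((PySem.List.pyRange 0 8 1).map (fun j => pvSquare board j i)) := by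
    funext res i
    rw [← List.foldl_map, pvFoldA_fst]
  rw [hfun, pvFoldl_and_all, Bool.true_and, pvLoopI_eq]
  refine congrArg ((PySem.List.pyRange 0 8 1).all) (funext fun i => ?_)
  rw [pvLoopJ_eq board i 8 0 (by omega), pvPairFree_eq_pvOkA]
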